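-- pv_equiv track=rewrite | github.com/Andrey-Duxch/Tureckiy | new folder/1.py | count_sub
-- ===== SOURCE A (Python) =====
-- def count_sub(n):
--     count = 0
--     while n > 0:
--         last_d = n % 10
--         if last_d == 0:
--             n = n - int(str(n)[0:1:])
--         n -= last_d
--         count += 1
--     return count
-- ===== SOURCE B (Python) =====
-- def count_sub(n):
--     if n <= 0:
--         return 0
--     r = n % 10
--     return (n - r) // 5 + (1 if r else 0)
-- ===== Notes on version B (the rewrite author's own statement) =====
-- stated objective: faster
-- what changed: Replaced the digit-subtraction simulation loop with a closed form: one step to strip the last digit (if nonzero), then every multiple of 10 takes exactly m/5 steps, giving (n - n%10)//5 + (1 if n%10 else 0).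
import Mathlib
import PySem

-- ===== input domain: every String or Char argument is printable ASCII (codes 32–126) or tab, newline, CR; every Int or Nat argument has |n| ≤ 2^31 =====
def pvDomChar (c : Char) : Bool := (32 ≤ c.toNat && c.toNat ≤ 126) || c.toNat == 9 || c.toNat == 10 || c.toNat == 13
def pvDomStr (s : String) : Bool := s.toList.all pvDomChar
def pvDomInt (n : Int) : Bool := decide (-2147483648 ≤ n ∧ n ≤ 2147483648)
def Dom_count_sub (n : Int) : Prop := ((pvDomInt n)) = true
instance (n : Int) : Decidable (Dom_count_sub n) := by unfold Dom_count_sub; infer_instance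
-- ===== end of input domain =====

-- B replaces A's step-by-step subtraction loop with a closed form (objective: faster, O(1) vs O(n)).

-- ===== PORT A =====
-- A's while-loop, as fuel recursion; fuel n.toNat always suffices (each iteration lowers n by ≥ 1).
def countSubLoop : Nat → Int → Int → Int
  | 0, _, count => count
  | fuel+1, n, count =>
    if n > 0 then
      let last_d := PySem.Int.mod n 10
      let n1 :=
        if last_d = 0 then
          -- n = n - int(str(n)[0:1:])
          match PySem.Int.ofStr? (PySem.Str.slice (PySem.Int.toStr n) (some 0) (some 1)) with
          | some d => n - d
          | none => n   -- unreachable: for n > 0 the first character of str(n) is a digit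
        else n
      countSubLoop fuel (n1 - last_d) (count + 1)
    else count

def count_sub (n : Int) : Int := countSubLoop n.toNat n 0

-- ===== PORT B =====
def count_sub_alt (n : Int) : Int :=
  if n ≤ 0 then 0
  else
    let r := PySem.Int.mod n 10
    PySem.Int.floordiv (n - r) 5 + (if r = 0 then 0 else 1)

-- ===== PRECONDITION & SPEC =====
def Spec_count_sub (n : Int) (out : Int) : Prop := out = count_sub_alt n
instance (n : Int) (out : Int) : Decidable (Spec_count_sub n out) := by unfold Spec_count_sub; infer_instance

-- ===== CLAIM (what is proved, stated in full; the proofs are below) =====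
def Claim_equal_count_sub : Prop := ∀ (n : Int), Dom_count_sub n → Spec_count_sub n (count_sub n)

-- ===== LEMMAS AND PROOFS =====

-- head of Nat.toDigitsCore 10 is the leading digit, which is 1..9 for a positive number
lemma toDigitsCore_head (f : Nat) : ∀ (m : Nat) (l : List Char), 1 ≤ m → m < 10 ^ f →
    ∃ k t, 1 ≤ k ∧ k ≤ 9 ∧ Nat.toDigitsCore 10 f m l = Nat.digitChar k :: t := by
  induction f with
  | zero => intro m l h1 h2; omega
  | succ f ih =>
    intro m l h1 h2
    by_cases hd : m / 10 = 0
    · refine ⟨m % 10, l, ?_, ?_, ?_⟩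
      · omega
      · omega
      · simp [Nat.toDigitsCore, hd]
    · obtain ⟨k, t, hk1, hk9, ht⟩ := ih (m / 10) (Nat.digitChar (m % 10) :: l)
        (by omega) (by rw [pow_succ] at h2; omega)
      refine ⟨k, t, hk1, hk9, ?_⟩
      simp [Nat.toDigitsCore, hd, ht]

-- for n ≥ 1, int(str(n)[0:1]) parses to the leading digit, which is 1..9
lemma first_digit_parse (n : Int) (hn : 1 ≤ n) :
    ∃ k : Nat, 1 ≤ k ∧ k ≤ 9 ∧
      PySem.Int.ofStr? (PySem.Str.slice (PySem.Int.toStr n) (some 0) (some 1)) = some (k : Int) := by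
  obtain ⟨k, t, hk1, hk9, ht⟩ := toDigitsCore_head (n.toNat + 1) n.toNat []
    (by omega) (lt_trans (Nat.lt_pow_self (by norm_num)) (Nat.pow_lt_pow_right (by norm_num) (by omega)))
  have htc : PySem.Int.toChars n = Nat.digitChar k :: t := by
    simp [PySem.Int.toChars, Nat.toDigits, show ¬ n < 0 by omega, ht]
  refine ⟨k, hk1, hk9, ?_⟩
  have hslice : PySem.Str.slice (PySem.Int.toStr n) (some 0) (some 1) =
      String.ofList [Nat.digitChar k] := by
    simp [PySem.Str.slice, PySem.Int.toStr, htc, PySem.Chars.slice, PySem.List.slice,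
      PySem.List.clampIdx]
  rw [hslice]
  interval_cases k <;> decide

lemma countSubLoop_eq (f : Nat) : ∀ (n count : Int), n.toNat ≤ f →
    countSubLoop f n count = count + count_sub_alt n := by
  induction f with
  | zero =>
    intro n count h
    have : n ≤ 0 := by omega
    simp [countSubLoop, count_sub_alt, this]
  | succ f ih =>
    intro n count h
    by_cases hn : n > 0
    · have hmod : PySem.Int.mod n 10 = n % 10 := PySem.Int.mod_eq_emod_of_pos (by norm_num)
      have hr0 : 0 ≤ n % 10 := Int.emod_nonneg n (by norm_num)
      have hr10 : n % 10 < 10 := Int.emod_lt_of_pos n (by norm_num)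
      by_cases hr : n % 10 = 0
      · -- last digit 0: subtract the leading digit
        have hn10 : 10 ≤ n := by omega
        obtain ⟨k, hk1, hk9, hparse⟩ := first_digit_parse n (by omega)
        have hstep : countSubLoop (f+1) n count = countSubLoop f (n - k) (count + 1) := by
          simp only [countSubLoop, if_pos hn, hmod, hr, hparse]
          norm_num
        rw [hstep, ih (n - k) (count + 1) (by omega)]
        have hk0 : (0:Int) < k := by exact_mod_cast hk1
        have hk9' : (k:Int) ≤ 9 := by exact_mod_cast hk9
        have hmod' : PySem.Int.mod (n - k) 10 = (n - k) % 10 :=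
          PySem.Int.mod_eq_emod_of_pos (by norm_num)
        have hpos' : ¬ (n - k ≤ 0) := by omega
        have hflo : ∀ a b : Int, 0 < b → PySem.Int.floordiv a b = a / b := fun a b hb =>
          PySem.Int.floordiv_eq_ediv_of_pos hb
        simp only [count_sub_alt, if_neg hpos', if_neg (by omega : ¬ n ≤ 0), hmod, hmod',
          hflo _ 5 (by norm_num)]
        have h10 : (10:Int) ∣ n := by omega
        have hm2 : (n - ↑k) % 10 = 10 - k := by omega
        rw [hr, hm2]
        simp only [if_neg (by omega : ¬ (10 - (k:Int) = 0))]
        norm_num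
        omega
      · -- nonzero last digit: subtract it
        have hstep : countSubLoop (f+1) n count = countSubLoop f (n - n % 10) (count + 1) := by
          simp only [countSubLoop, if_pos hn, hmod, if_neg hr]
        rw [hstep, ih (n - n % 10) (count + 1) (by omega)]
        have hmod' : PySem.Int.mod (n - n % 10) 10 = (n - n % 10) % 10 :=
          PySem.Int.mod_eq_emod_of_pos (by norm_num)
        have hm2 : (n - n % 10) % 10 = 0 := by omega
        have hflo : ∀ a : Int, PySem.Int.floordiv a 5 = a / 5 := fun a =>
          PySem.Int.floordiv_eq_ediv_of_pos (by norm_num)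
        by_cases hz : n - n % 10 ≤ 0
        · have he : n - n % 10 = 0 := by omega
          simp only [count_sub_alt, if_neg (by omega : ¬ n ≤ 0), hmod, hflo,
            if_neg hr, he]
          norm_num
        · simp only [count_sub_alt, if_neg hz, if_neg (by omega : ¬ n ≤ 0), hmod, hmod', hflo,
            hm2, if_neg hr]
          norm_num
          omega
    · simp [countSubLoop, hn, count_sub_alt, show n ≤ 0 by omega]

-- ===== VERDICT (by name: the statement is the Claim_ definition above) =====
theorem count_sub_spec : Claim_equal_count_sub := by
  intro n _
  unfold Spec_count_sub count_sub
  rw [countSubLoop_eq n.toNat n 0 le_rfl, zero_add]
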